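-- pv_equiv track=rewrite | github.com/mhandley/ENGF34-2023 | video5-data-structures/src/binarysearch.py | is_in_bisect
-- ===== SOURCE A (Python) =====
-- def is_in_bisect(lst, val):
--     """ Resturns True if val is within the sorted list lst. """
--     if len(lst) == 0:
--         return False
--     start = 0          # start of search range
--     end = len(lst)     # end of search range
--     while end - start > 1:
--         middle = (start + end) // 2
--         if val >= lst[middle]:
--             start = middle
--         else:
--             end = middle
--     return lst[start] == val
-- ===== SOURCE B (Python) =====
-- def is_in_bisect(lst, val):
--     """ Returns True if val is within the sorted list lst. """
--     if len(lst) == 0: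
--         return False
--
--     def search(seg):
--         # divide and conquer on the segment itself (no index bookkeeping)
--         if len(seg) <= 1:
--             return seg[0] == val
--         m = len(seg) // 2
--         return search(seg[m:]) if val >= seg[m] else search(seg[:m])
--
--     return search(lst)
-- ===== Notes on version B (the rewrite author's own statement) =====
-- stated objective: alternative
-- what changed: Replaces the iterative start/end index loop by a recursive divide-and-conquer helper that slices the list and recurses on the chosen half, with no index state.
import Mathlib
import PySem

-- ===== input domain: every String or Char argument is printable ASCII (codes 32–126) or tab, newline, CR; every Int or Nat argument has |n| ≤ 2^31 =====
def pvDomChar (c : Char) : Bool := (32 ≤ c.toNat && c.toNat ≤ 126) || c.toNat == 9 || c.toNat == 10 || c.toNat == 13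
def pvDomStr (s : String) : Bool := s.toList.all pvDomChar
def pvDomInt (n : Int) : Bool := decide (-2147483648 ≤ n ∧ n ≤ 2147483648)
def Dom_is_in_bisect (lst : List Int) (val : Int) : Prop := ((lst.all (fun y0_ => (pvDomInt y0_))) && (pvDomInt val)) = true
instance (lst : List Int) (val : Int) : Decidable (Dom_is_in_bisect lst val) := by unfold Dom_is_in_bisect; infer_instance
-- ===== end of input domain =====

-- B replaces A's iterative start/end index loop by a recursive divide-and-conquer
-- helper on list slices (objective: alternative decomposition, same results).

-- ===== PORT A =====
-- the while loop, as recursion on the shrinking window width (end - start);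
-- indices are always in range on A's reachable states, so pyGetD's default is never used
def isInBisectLoop (lst : List Int) (val start e : Int) : Bool :=
  if _h : e - start > 1 then
    let middle := PySem.Int.floordiv (start + e) 2
    if val ≥ PySem.List.pyGetD lst middle 0 then
      isInBisectLoop lst val middle e
    else
      isInBisectLoop lst val start middle
  else
    PySem.List.pyGetD lst start 0 == val
termination_by (e - start).toNat
decreasing_by
  · have h1 : start + 1 ≤ PySem.Int.floordiv (start + e) 2 := by
      rw [PySem.Int.le_floordiv_iff_mul_le (by omega : (0:Int) < 2)]; omega
    have h2 : PySem.Int.floordiv (start + e) 2 < e := by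
      rw [PySem.Int.floordiv_lt_iff_lt_mul (by omega : (0:Int) < 2)]; omega
    omega
  · have h1 : start + 1 ≤ PySem.Int.floordiv (start + e) 2 := by
      rw [PySem.Int.le_floordiv_iff_mul_le (by omega : (0:Int) < 2)]; omega
    have h2 : PySem.Int.floordiv (start + e) 2 < e := by
      rw [PySem.Int.floordiv_lt_iff_lt_mul (by omega : (0:Int) < 2)]; omega
    omega

def is_in_bisect (lst : List Int) (val : Int) : Bool :=
  if lst.length = 0 then false
  else isInBisectLoop lst val 0 (lst.length : Int)

-- ===== PORT B =====
-- recursive helper: slice the segment and recurse on the chosen half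
def searchAlt (val : Int) (seg : List Int) : Bool :=
  if _h : seg.length ≤ 1 then
    PySem.List.pyGetD seg 0 0 == val
  else
    let m : Int := PySem.Int.floordiv (seg.length : Int) 2
    if val ≥ PySem.List.pyGetD seg m 0 then
      searchAlt val (PySem.List.slice seg (some m) none)
    else
      searchAlt val (PySem.List.slice seg none (some m))
termination_by seg.length
decreasing_by
  · have : PySem.Int.floordiv (seg.length : Int) 2 = ((seg.length / 2 : Nat) : Int) := by
      exact_mod_cast PySem.Int.floordiv_natCast seg.length 2
    rw [this, PySem.List.slice_from_natCast]
    simp [List.length_drop]; omega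
  · have : PySem.Int.floordiv (seg.length : Int) 2 = ((seg.length / 2 : Nat) : Int) := by
      exact_mod_cast PySem.Int.floordiv_natCast seg.length 2
    rw [this, PySem.List.slice_to_natCast]
    simp [List.length_take]; omega

def is_in_bisect_alt (lst : List Int) (val : Int) : Bool :=
  if lst.length = 0 then false
  else searchAlt val lst

-- ===== PRECONDITION & SPEC =====
def Spec_is_in_bisect (lst : List Int) (val : Int) (out : Bool) : Prop := out = is_in_bisect_alt lst val
instance (lst : List Int) (val : Int) (out : Bool) : Decidable (Spec_is_in_bisect lst val out) := by unfold Spec_is_in_bisect; infer_instance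

-- ===== CLAIM (what is proved, stated in full; the proofs are below) =====
def Claim_equal_is_in_bisect : Prop := ∀ (lst : List Int) (val : Int), Dom_is_in_bisect lst val → Spec_is_in_bisect lst val (is_in_bisect lst val)

-- ===== LEMMAS AND PROOFS =====

lemma loop_eq_search (lst : List Int) (val : Int) :
    ∀ (w s e : Nat), e - s = w → s < e → e ≤ lst.length →
      isInBisectLoop lst val (s : Int) (e : Int) = searchAlt val ((lst.drop s).take (e - s)) := by
  intro w
  induction w using Nat.strong_induction_on with
  | _ w ih =>
    intro s e hw hse hel
    have hseglen : ((lst.drop s).take (e - s)).length = e - s := by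
      simp [List.length_take, List.length_drop]; omega
    by_cases hgt : 1 < e - s
    · -- loop continues / recursion splits
      have hmid : PySem.Int.floordiv ((s : Int) + (e : Int)) 2 = (((s + e) / 2 : Nat) : Int) := by
        push_cast
        exact_mod_cast PySem.Int.floordiv_natCast (s + e) 2
      set m : Nat := (s + e) / 2 with hm
      have hsm : s < m := by omega
      have hme : m < e := by omega
      have hk : (e - s) / 2 = m - s := by omega
      -- the element A compares equals the element B compares
      have hgetA : PySem.List.pyGetD lst ((m : Nat) : Int) 0 = lst[m]'(by omega) := by
        rw [PySem.List.pyGetD_natCast]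
        exact List.getD_eq_getElem _ _ (by omega)
      have hgetB : PySem.List.pyGetD ((lst.drop s).take (e - s)) ((((e - s) / 2 : Nat)) : Int) 0
          = lst[m]'(by omega) := by
        rw [PySem.List.pyGetD_natCast]
        rw [List.getD_eq_getElem _ _ (by omega : (e - s) / 2 < ((lst.drop s).take (e - s)).length)]
        simp only [List.getElem_take, List.getElem_drop]
        congr 1; omega
      rw [isInBisectLoop, searchAlt]
      rw [dif_pos (by omega : (e : Int) - (s : Int) > 1),
          dif_neg (by omega : ¬ ((lst.drop s).take (e - s)).length ≤ 1)]
      simp only [hseglen, hmid]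
      have hmidB : PySem.Int.floordiv ((e - s : Nat) : Int) 2 = (((e - s) / 2 : Nat) : Int) := by
        exact_mod_cast PySem.Int.floordiv_natCast (e - s) 2
      rw [hmidB, hgetA, hgetB]
      by_cases hc : val ≥ lst[m]'(by omega)
      · rw [if_pos hc, if_pos hc]
        rw [PySem.List.slice_from_natCast]
        have hdrop : ((lst.drop s).take (e - s)).drop ((e - s) / 2)
            = (lst.drop m).take (e - m) := by
          rw [List.drop_take, List.drop_drop]
          congr 1
          · omega
          · congr 1
            omega
        rw [hdrop]
        exact ih (e - m) (by omega) m e rfl hme hel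
      · rw [if_neg hc, if_neg hc]
        rw [PySem.List.slice_to_natCast]
        have htake : ((lst.drop s).take (e - s)).take ((e - s) / 2)
            = (lst.drop s).take (m - s) := by
          rw [List.take_take]
          congr 1; omega
        rw [htake]
        exact ih (m - s) (by omega) s m rfl hsm (by omega)
    · -- window of width 1: both compare the first element of the window
      have h1 : e - s = 1 := by omega
      rw [isInBisectLoop, searchAlt]
      rw [dif_neg (by omega : ¬ (e : Int) - (s : Int) > 1),
          dif_pos (by omega : ((lst.drop s).take (e - s)).length ≤ 1)]
      have hA : PySem.List.pyGetD lst ((s : Nat) : Int) 0 = lst[s]'(by omega) := by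
        rw [PySem.List.pyGetD_natCast]
        exact List.getD_eq_getElem _ _ (by omega)
      have hB : PySem.List.pyGetD ((lst.drop s).take (e - s)) 0 0 = lst[s]'(by omega) := by
        rw [(by norm_cast : (0 : Int) = ((0 : Nat) : Int)), PySem.List.pyGetD_natCast]
        rw [List.getD_eq_getElem _ _ (by omega : 0 < ((lst.drop s).take (e - s)).length)]
        simp [List.getElem_take, List.getElem_drop]
      rw [hA, hB]

-- ===== VERDICT (by name: the statement is the Claim_ definition above) =====
theorem is_in_bisect_spec : Claim_equal_is_in_bisect := by
  intro lst val _
  unfold Spec_is_in_bisect is_in_bisect is_in_bisect_alt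
  by_cases h : lst.length = 0
  · simp [h]
  · rw [if_neg h, if_neg h]
    have := loop_eq_search lst val lst.length 0 lst.length rfl (by omega) (le_refl _)
    simpa using this
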